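-- pv_equiv track=rewrite | github.com/ElderLab-York-University/3D_Rim_py | lib/edge_to_contours.py | build_edge_index
-- ===== SOURCE A (Python) =====
-- def build_edge_index(edges):
--     edge_index = {}
--     point_index = {}
--     # 遍历所有的边
--     for i, edge in enumerate(edges):
--         # 对于每一条边，将它添加到起点和终点的边列表中
--         if edge[0] not in edge_index:
--             edge_index[edge[0]] = []
--             point_index[edge[0]] = []
--         if edge[1] not in edge_index:
--             edge_index[edge[1]] = []
--             point_index[edge[1]] = []
--         edge_index[edge[0]].append(i)
--         edge_index[edge[1]].append(i)
--         point_index[edge[0]].append(edge[1])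
--         point_index[edge[1]].append(edge[0])
--     return edge_index,point_index
-- ===== SOURCE B (Python) =====
-- def build_edge_index(edges):
--     # First pass: build only edge_index (edge ids incident to each endpoint).
--     edge_index = {}
--     for i, (u, v) in enumerate(edges):
--         if u not in edge_index:
--             edge_index[u] = []
--         if v not in edge_index:
--             edge_index[v] = []
--         edge_index[u].append(i)
--         edge_index[v].append(i)
--     # Second pass: derive point_index from edge_index, taking for each node the
--     # opposite endpoint of every incident edge (self-loops yield the node itself).
--     point_index = {
--         node: [edges[i][0] if node == edges[i][1] else edges[i][1] for i in incident]
--         for node, incident in edge_index.items()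
--     }
--     return edge_index, point_index
-- ===== Notes on version B (the rewrite author's own statement) =====
-- stated objective: alternative
-- what changed: Instead of building edge_index and point_index in lockstep inside one loop, B builds only edge_index in one pass and then derives point_index in a second pass from edge_index, mapping each incident edge id to its opposite endpoint via edges[i].
import Mathlib
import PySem

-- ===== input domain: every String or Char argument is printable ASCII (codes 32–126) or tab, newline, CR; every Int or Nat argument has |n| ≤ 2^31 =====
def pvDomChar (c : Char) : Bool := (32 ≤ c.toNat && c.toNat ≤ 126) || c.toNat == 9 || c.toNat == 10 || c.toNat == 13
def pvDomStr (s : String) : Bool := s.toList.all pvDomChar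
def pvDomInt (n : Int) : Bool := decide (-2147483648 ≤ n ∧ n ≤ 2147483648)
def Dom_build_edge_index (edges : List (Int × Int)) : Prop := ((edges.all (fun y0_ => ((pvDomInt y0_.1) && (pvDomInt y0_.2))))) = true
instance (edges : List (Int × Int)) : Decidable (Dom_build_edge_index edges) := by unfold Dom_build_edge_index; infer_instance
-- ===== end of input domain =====

-- B builds edge_index alone in a first pass, then derives point_index from it in a second
-- pass (opposite endpoint of each incident edge) instead of A's lockstep single loop.


-- ===== PORT A =====
-- one iteration of A's loop: state is (edge_index, point_index), item is (i, edge)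
def pvStepA (s : PySem.Dict Int (List Int) × PySem.Dict Int (List Int))
    (p : Int × (Int × Int)) : PySem.Dict Int (List Int) × PySem.Dict Int (List Int) :=
  let i := p.1
  let e := p.2
  let s1 := if s.1.contains e.1 then s else (s.1.insert e.1 [], s.2.insert e.1 [])
  let s2 := if s1.1.contains e.2 then s1 else (s1.1.insert e.2 [], s1.2.insert e.2 [])
  ((s2.1.modify e.1 [] (· ++ [i])).modify e.2 [] (· ++ [i]),
   (s2.2.modify e.1 [] (· ++ [e.2])).modify e.2 [] (· ++ [e.1]))

def build_edge_index (edges : List (Int × Int)) : (List (Int × List Int)) × (List (Int × List Int)) :=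
  let r := (PySem.List.enumerate edges).foldl pvStepA (PySem.Dict.empty, PySem.Dict.empty)
  (r.1.items, r.2.items)

-- ===== PORT B =====
-- opposite endpoint of edge edges[i] as seen from node (index always in range in B)
def pvOpp (edges : List (Int × Int)) (node : Int) (i : Int) : Int :=
  let e := PySem.List.pyGetD edges i (0, 0)
  if node = e.2 then e.1 else e.2

-- one iteration of B's first pass: builds edge_index only
def pvStepB (d : PySem.Dict Int (List Int)) (p : Int × (Int × Int)) : PySem.Dict Int (List Int) :=
  let i := p.1
  let e := p.2
  let d1 := if d.contains e.1 then d else d.insert e.1 []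
  let d2 := if d1.contains e.2 then d1 else d1.insert e.2 []
  (d2.modify e.1 [] (· ++ [i])).modify e.2 [] (· ++ [i])

def build_edge_index_alt (edges : List (Int × Int)) : (List (Int × List Int)) × (List (Int × List Int)) :=
  let ei := (PySem.List.enumerate edges).foldl pvStepB PySem.Dict.empty
  (ei.items, ei.items.map (fun q => (q.1, q.2.map (pvOpp edges q.1))))

-- ===== PRECONDITION & SPEC =====
def Spec_build_edge_index (edges : List (Int × Int)) (out : (List (Int × List Int)) × (List (Int × List Int))) : Prop := out = build_edge_index_alt edges
instance (edges : List (Int × Int)) (out : (List (Int × List Int)) × (List (Int × List Int))) : Decidable (Spec_build_edge_index edges out) := by unfold Spec_build_edge_index; infer_instance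

-- ===== CLAIM (what is proved, stated in full; the proofs are below) =====
def Claim_equal_build_edge_index : Prop := ∀ (edges : List (Int × Int)), Dom_build_edge_index edges → Spec_build_edge_index edges (build_edge_index edges)

-- ===== LEMMAS AND PROOFS =====

-- B's second pass, as a map over a dict's items
def pvDeriv (edges : List (Int × Int)) (d : PySem.Dict Int (List Int)) : PySem.Dict Int (List Int) :=
  PySem.Dict.mk (d.items.map (fun q => (q.1, q.2.map (pvOpp edges q.1))))

theorem pvDeriv_contains (edges : List (Int × Int)) (d : PySem.Dict Int (List Int)) (k : Int) :
    (pvDeriv edges d).contains k = d.contains k := by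
  simp [pvDeriv, PySem.Dict.contains, List.any_map, Function.comp_def]

theorem pvDeriv_get? (edges : List (Int × Int)) (d : PySem.Dict Int (List Int)) (k : Int) :
    (pvDeriv edges d).get? k = (d.get? k).map (List.map (pvOpp edges k)) := by
  obtain ⟨l⟩ := d
  induction l with
  | nil => rfl
  | cons p rest ih =>
    obtain ⟨pk, pv⟩ := p
    by_cases h : pk = k
    · subst h
      simp [pvDeriv, PySem.Dict.get?_mk_cons]
    · simp only [pvDeriv, List.map_cons] at ih ⊢
      rw [PySem.Dict.get?_mk_cons, PySem.Dict.get?_mk_cons]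
      simp only [beq_iff_eq, h, if_false]
      exact ih

theorem pvDeriv_getD (edges : List (Int × Int)) (d : PySem.Dict Int (List Int)) (k : Int) :
    (pvDeriv edges d).getD k [] = (d.getD k []).map (pvOpp edges k) := by
  rw [PySem.Dict.getD_eq_get?_getD, PySem.Dict.getD_eq_get?_getD, pvDeriv_get?]
  cases d.get? k <;> simp

theorem pvDeriv_insert (edges : List (Int × Int)) (d : PySem.Dict Int (List Int)) (k : Int) (v : List Int) :
    pvDeriv edges (d.insert k v) = (pvDeriv edges d).insert k (v.map (pvOpp edges k)) := by
  apply PySem.Dict.ext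
  by_cases h : d.contains k = true
  · have h' : (pvDeriv edges d).contains k = true := by rw [pvDeriv_contains]; exact h
    rw [show (pvDeriv edges (d.insert k v)).items
          = ((d.insert k v).items).map (fun q => (q.1, q.2.map (pvOpp edges q.1))) from rfl,
        PySem.Dict.items_insert_of_contains d v h,
        PySem.Dict.items_insert_of_contains _ _ h',
        show (pvDeriv edges d).items = d.items.map (fun q => (q.1, q.2.map (pvOpp edges q.1))) from rfl,
        List.map_map, List.map_map]
    apply List.map_congr_left
    intro p _
    by_cases hp : p.1 = k
    · simp [Function.comp_def, hp]
    · simp [Function.comp_def, hp]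
  · have h0 : d.contains k = false := by simpa using h
    have h' : (pvDeriv edges d).contains k = false := by rw [pvDeriv_contains]; exact h0
    rw [show (pvDeriv edges (d.insert k v)).items
          = ((d.insert k v).items).map (fun q => (q.1, q.2.map (pvOpp edges q.1))) from rfl,
        PySem.Dict.items_insert_of_not_contains d v h0,
        PySem.Dict.items_insert_of_not_contains _ _ h']
    simp [pvDeriv]

theorem pvDeriv_modify (edges : List (Int × Int)) (d : PySem.Dict Int (List Int)) (k : Int) (i : Int) :
    pvDeriv edges (d.modify k [] (· ++ [i])) = (pvDeriv edges d).modify k [] (· ++ [pvOpp edges k i]) := by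
  simp only [PySem.Dict.modify, pvDeriv_insert, pvDeriv_getD, List.map_append, List.map_cons,
    List.map_nil]

theorem pvStep_agree (edges : List (Int × Int)) (d : PySem.Dict Int (List Int))
    (p : Int × (Int × Int)) (he : PySem.List.pyGetD edges p.1 (0, 0) = p.2) :
    pvStepA (d, pvDeriv edges d) p = (pvStepB d p, pvDeriv edges (pvStepB d p)) := by
  obtain ⟨i, u, v⟩ := p
  have he' : PySem.List.pyGetD edges i (0, 0) = (u, v) := he
  have hu : pvOpp edges u i = v := by
    simp only [pvOpp, he']
    by_cases h : u = v
    · simp [h]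
    · simp [h]
  have hv : pvOpp edges v i = u := by simp [pvOpp, he']
  simp only [pvStepA, pvStepB]
  by_cases h1 : d.contains u = true
  · by_cases h2 : d.contains v = true
    · simp [h1, h2, pvDeriv_modify, hu, hv]
    · simp [h1, h2, pvDeriv_insert, pvDeriv_modify, hu, hv]
  · by_cases h2 : (d.insert u []).contains v = true
    · simp [h1, h2, pvDeriv_insert, pvDeriv_modify, hu, hv]
    · simp [h1, h2, pvDeriv_insert, pvDeriv_modify, hu, hv]

theorem pvFold_agree (edges : List (Int × Int)) (l : List (Int × (Int × Int)))
    (hl : ∀ p ∈ l, PySem.List.pyGetD edges p.1 (0, 0) = p.2) (d : PySem.Dict Int (List Int)) :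
    l.foldl pvStepA (d, pvDeriv edges d) = (l.foldl pvStepB d, pvDeriv edges (l.foldl pvStepB d)) := by
  induction l generalizing d with
  | nil => rfl
  | cons p rest ih =>
    simp only [List.foldl_cons]
    rw [pvStep_agree edges d p (hl p (by simp))]
    exact ih (fun q hq => hl q (by simp [hq])) _

theorem pvEnum_lookup (edges : List (Int × Int)) :
    ∀ p ∈ PySem.List.enumerate edges 0, PySem.List.pyGetD edges p.1 (0, 0) = p.2 := by
  intro p hp
  rw [PySem.List.mem_enumerate_iff] at hp
  obtain ⟨k, hk, rfl⟩ := hp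
  simp [PySem.List.pyGetD_natCast, List.getD_eq_getElem?_getD, List.getElem?_eq_getElem hk]

-- ===== VERDICT (by name: the statement is the Claim_ definition above) =====
theorem build_edge_index_spec : Claim_equal_build_edge_index := by
  intro edges _
  unfold Spec_build_edge_index build_edge_index build_edge_index_alt
  have h := pvFold_agree edges (PySem.List.enumerate edges 0) (pvEnum_lookup edges) PySem.Dict.empty
  have hempty : pvDeriv edges PySem.Dict.empty = PySem.Dict.empty := rfl
  rw [hempty] at h
  simp only [h]
  rfl
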